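-- pv_equiv track=rewrite | github.com/xiang-jun/dssr-pymol | archive/eric_versions/dssr_select_Eric_2026-02-18.py | parse_dotbracket_pseudoknots
-- ===== SOURCE A (Python) =====
-- def parse_dotbracket_pseudoknots(dotbracket):
--     stack_map = {'(': ')', '[': ']', '{': '}', '<': '>'}
--     close_to_open = {v: k for k, v in stack_map.items()}
--     stacks = {}
--     layers = {}
--     layer_assignment = {'()': 0, '[]': 1, '{}': 2, '<>': 3}
--     next_layer = 4
--
--     for idx, char in enumerate(dotbracket):
--         if char == '.':
--             continue
--
--         if char in stack_map:
--             bracket_type = char + stack_map[char]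
--             stacks.setdefault(bracket_type, []).append(idx)
--
--         elif char in close_to_open:
--             open_char = close_to_open[char]
--             bracket_type = open_char + char
--             if bracket_type not in stacks or not stacks[bracket_type]:
--                 continue
--             open_idx = stacks[bracket_type].pop()
--             if bracket_type not in layer_assignment:
--                 layer_assignment[bracket_type] = next_layer
--                 next_layer += 1
--             layer = layer_assignment[bracket_type]
--             layers.setdefault(layer, []).append((open_idx, idx))
--
--         elif char.isalpha():
--             stacks.setdefault(char, [])
--             if not stacks[char]:
--                 stacks[char].append(idx)
--             else:
--                 open_idx = stacks[char].pop()
--                 if char not in layer_assignment: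
--                     layer_assignment[char] = next_layer
--                     next_layer += 1
--                 layer = layer_assignment[char]
--                 layers.setdefault(layer, []).append((open_idx, idx))
--
--     return layers
-- ===== SOURCE B (Python) =====
-- OPEN = '([{<'
-- CLOSE = ')]}>'
--
-- def parse_dotbracket_pseudoknots(dotbracket):
--     # Pass 1: match brackets/letter-toggles into a flat list of (open, close, key) in close order.
--     stacks = {}
--     pairs = []
--     for idx, ch in enumerate(dotbracket):
--         if ch in OPEN:
--             key = ch + CLOSE[OPEN.index(ch)]
--             stacks.setdefault(key, []).append(idx)
--         elif ch in CLOSE: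
--             key = OPEN[CLOSE.index(ch)] + ch
--             st = stacks.get(key)
--             if st:
--                 pairs.append((st.pop(), idx, key))
--         elif ch.isalpha():
--             st = stacks.setdefault(ch, [])
--             if st:
--                 pairs.append((st.pop(), idx, ch))
--             else:
--                 st.append(idx)
--     # Pass 2: closed-form layer numbers: fixed for bracket families,
--     # 4 + first-close rank for letter types.
--     fixed = {'()': 0, '[]': 1, '{}': 2, '<>': 3}
--     letter_order = []
--     for _, _, key in pairs:
--         if key not in fixed and key not in letter_order:
--             letter_order.append(key)
--     layers = {}
--     for open_idx, close_idx, key in pairs: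
--         layer = fixed[key] if key in fixed else 4 + letter_order.index(key)
--         layers.setdefault(layer, []).append((open_idx, close_idx))
--     return layers
-- ===== Notes on version B (the rewrite author's own statement) =====
-- stated objective: alternative
-- what changed: A fuses matching and layer bookkeeping (layer_assignment dict + next_layer counter mutated inside the scan) into one pass; B first emits a flat list of matched (open, close, type) triples, then assigns layers by a closed-form rule (fixed numbers for the four bracket families, 4 + first-close rank in a deduplicated letter_order list for letters) in a separate grouping pass.
import Mathlib
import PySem

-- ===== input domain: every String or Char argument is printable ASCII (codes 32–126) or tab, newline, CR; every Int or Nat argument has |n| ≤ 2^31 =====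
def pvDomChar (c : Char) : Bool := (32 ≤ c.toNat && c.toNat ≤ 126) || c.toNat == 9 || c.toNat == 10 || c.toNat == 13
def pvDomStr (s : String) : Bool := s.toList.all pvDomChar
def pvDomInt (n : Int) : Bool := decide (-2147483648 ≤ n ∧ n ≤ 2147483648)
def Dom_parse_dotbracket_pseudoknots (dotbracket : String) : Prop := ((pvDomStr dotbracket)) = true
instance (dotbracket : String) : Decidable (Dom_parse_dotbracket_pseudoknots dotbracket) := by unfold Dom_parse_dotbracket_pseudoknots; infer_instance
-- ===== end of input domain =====

-- B replaces A's fused matching+layer bookkeeping by two passes: first emit the flat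
-- matched-pair list, then assign layers by a closed-form rank (fixed for bracket
-- families, 4 + first-close rank for letters); objective: alternative decomposition.

-- ===== PORT A =====
-- dict keys ('()', 'a', …) are modelled as List Char (Python str on the ASCII domain)
def pvStackMap : PySem.Dict Char Char :=
  PySem.Dict.ofList [('(', ')'), ('[', ']'), ('{', '}'), ('<', '>')]

def pvCloseToOpen : PySem.Dict Char Char :=
  PySem.Dict.ofList [(')', '('), (']', '['), ('}', '{'), ('>', '<')]

def pvFixedA : PySem.Dict (List Char) Int :=
  PySem.Dict.ofList [(['(', ')'], 0), (['[', ']'], 1), (['{', '}'], 2), (['<', '>'], 3)]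

-- A's emission code: assign a layer (allocating next_layer for a new key) and append the pair
def pvGStep (g : PySem.Dict Int (List (Int × Int)) × PySem.Dict (List Char) Int × Int)
    (p : Int × Int × List Char) :
    PySem.Dict Int (List (Int × Int)) × PySem.Dict (List Char) Int × Int :=
  let (layers, assign, nxt) := g
  let (o, c, k) := p
  let (assign', nxt') := if assign.contains k then (assign, nxt) else (assign.insert k nxt, nxt + 1)
  let layer := assign'.getD k 0
  (layers.insert layer (layers.getD layer [] ++ [(o, c)]), assign', nxt')

-- A's loop body for one (idx, char)
def pvAStep
    (s : PySem.Dict (List Char) (List Int) ×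
         (PySem.Dict Int (List (Int × Int)) × PySem.Dict (List Char) Int × Int))
    (ic : Int × Char) :
    PySem.Dict (List Char) (List Int) ×
      (PySem.Dict Int (List (Int × Int)) × PySem.Dict (List Char) Int × Int) :=
  let (idx, ch) := ic
  if ch = '.' then s
  else match pvStackMap.get? ch with
  | some cl =>
      let bt := [ch, cl]
      (s.1.insert bt (s.1.getD bt [] ++ [idx]), s.2)      -- stacks.setdefault(bt, []).append(idx)
  | none => match pvCloseToOpen.get? ch with
    | some op =>
        let bt := [op, ch]
        let st := s.1.getD bt []                           -- covers "bt not in stacks or not stacks[bt]"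
        match st.getLast? with
        | none => s
        | some o => (s.1.insert bt st.dropLast, pvGStep s.2 (o, idx, bt))   -- .pop()
    | none =>
        if PySem.Chars.isalpha ch then
          let st := s.1.getD [ch] []
          match st.getLast? with
          | none => (s.1.insert [ch] (st ++ [idx]), s.2)
          | some o => (s.1.insert [ch] st.dropLast, pvGStep s.2 (o, idx, [ch]))
        else s

def parse_dotbracket_pseudoknots (dotbracket : String) : List (Int × List (Int × Int)) :=
  ((PySem.List.enumerate dotbracket.toList).foldl pvAStep
    (PySem.Dict.empty, (PySem.Dict.empty, pvFixedA, 4))).2.1.items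

-- ===== PORT B =====
def pvOpeners : List Char := ['(', '[', '{', '<']
def pvClosers : List Char := [')', ']', '}', '>']

def pvFixedB : PySem.Dict (List Char) Int :=
  PySem.Dict.ofList [(['(', ')'], 0), (['[', ']'], 1), (['{', '}'], 2), (['<', '>'], 3)]

-- pass-1 body: matching only, emits the pair(s) appended for this character
def pvBEmit (sks : PySem.Dict (List Char) (List Int)) (ic : Int × Char) :
    PySem.Dict (List Char) (List Int) × List (Int × Int × List Char) :=
  let (idx, ch) := ic
  if pvOpeners.contains ch then
    let key := [ch, pvClosers.getD (List.idxOf ch pvOpeners) ' ']  -- CLOSE[OPEN.index(ch)], index always in range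
    (sks.insert key (sks.getD key [] ++ [idx]), [])
  else if pvClosers.contains ch then
    let key := [pvOpeners.getD (List.idxOf ch pvClosers) ' ', ch]
    let st := sks.getD key []                                   -- stacks.get(key); empty ↔ falsy
    match st.getLast? with
    | none => (sks, [])
    | some o => (sks.insert key st.dropLast, [(o, idx, key)])
  else if PySem.Chars.isalpha ch then
    let st := sks.getD [ch] []
    match st.getLast? with
    | none => (sks.insert [ch] (st ++ [idx]), [])
    | some o => (sks.insert [ch] st.dropLast, [(o, idx, [ch])])
  else (sks, [])

def pvBStep
    (s : PySem.Dict (List Char) (List Int) × List (Int × Int × List Char)) (ic : Int × Char) :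
    PySem.Dict (List Char) (List Int) × List (Int × Int × List Char) :=
  let r := pvBEmit s.1 ic
  (r.1, s.2 ++ r.2)

def pvKeyOf (p : Int × Int × List Char) : List Char := p.2.2

-- letter_order: first-occurrence list of the non-fixed keys, in close order
def pvLO (ps : List (Int × Int × List Char)) : List (List Char) :=
  ps.foldl (fun acc p =>
    if pvFixedB.contains (pvKeyOf p) || acc.contains (pvKeyOf p) then acc
    else acc ++ [pvKeyOf p]) []

-- layer = fixed[key] if key in fixed else 4 + letter_order.index(key)
-- (.index never raises here: every non-fixed key of ps is in letter_order)
def pvLayerF (lo : List (List Char)) (k : List Char) : Int :=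
  match pvFixedB.get? k with
  | some v => v
  | none => 4 + (List.idxOf k lo : Int)

def pvGroup (f : List Char → Int) (ps : List (Int × Int × List Char)) :
    PySem.Dict Int (List (Int × Int)) :=
  ps.foldl (fun L p =>
    L.insert (f (pvKeyOf p)) (L.getD (f (pvKeyOf p)) [] ++ [(p.1, p.2.1)])) PySem.Dict.empty

def parse_dotbracket_pseudoknots_alt (dotbracket : String) : List (Int × List (Int × Int)) :=
  let ps := ((PySem.List.enumerate dotbracket.toList).foldl pvBStep (PySem.Dict.empty, [])).2
  (pvGroup (pvLayerF (pvLO ps)) ps).items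

-- ===== PRECONDITION & SPEC =====
def Spec_parse_dotbracket_pseudoknots (dotbracket : String) (out : List (Int × List (Int × Int))) : Prop := out = parse_dotbracket_pseudoknots_alt dotbracket
instance (dotbracket : String) (out : List (Int × List (Int × Int))) : Decidable (Spec_parse_dotbracket_pseudoknots dotbracket out) := by unfold Spec_parse_dotbracket_pseudoknots; infer_instance

-- ===== CLAIM (what is proved, stated in full; the proofs are below) =====
def Claim_equal_parse_dotbracket_pseudoknots : Prop := ∀ (dotbracket : String), Dom_parse_dotbracket_pseudoknots dotbracket → Spec_parse_dotbracket_pseudoknots dotbracket (parse_dotbracket_pseudoknots dotbracket)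

-- ===== LEMMAS AND PROOFS =====

-- per-character alignment of A's fused step with B's matching step + A's emission code
theorem pv_stepAB (st : PySem.Dict (List Char) (List Int))
    (g : PySem.Dict Int (List (Int × Int)) × PySem.Dict (List Char) Int × Int) (ic : Int × Char) :
    pvAStep (st, g) ic = ((pvBEmit st ic).1, (pvBEmit st ic).2.foldl pvGStep g) := by
  obtain ⟨idx, ch⟩ := ic
  by_cases h1 : ch = '(' ; · subst h1; rfl
  by_cases h2 : ch = '[' ; · subst h2; rfl
  by_cases h3 : ch = '{' ; · subst h3; rfl
  by_cases h4 : ch = '<' ; · subst h4; rfl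
  by_cases h5 : ch = ')'
  · subst h5
    have m1 : pvStackMap.get? ')' = none := rfl
    have m2 : pvCloseToOpen.get? ')' = some '(' := rfl
    have m3 : ¬ (')' ∈ pvOpeners) := by decide
    have m4 : (')' ∈ pvClosers) := by decide
    have m5 : pvOpeners[List.idxOf ')' pvClosers]?.getD ' ' = '(' := rfl
    cases hl : (PySem.Dict.getD st ['(', ')'] []).getLast? <;>
      simp [pvAStep, pvBEmit, m1, m2, m3, m4, m5, hl]
  by_cases h6 : ch = ']'
  · subst h6
    have m1 : pvStackMap.get? ']' = none := rfl
    have m2 : pvCloseToOpen.get? ']' = some '[' := rfl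
    have m3 : ¬ (']' ∈ pvOpeners) := by decide
    have m4 : (']' ∈ pvClosers) := by decide
    have m5 : pvOpeners[List.idxOf ']' pvClosers]?.getD ' ' = '[' := rfl
    cases hl : (PySem.Dict.getD st ['[', ']'] []).getLast? <;>
      simp [pvAStep, pvBEmit, m1, m2, m3, m4, m5, hl]
  by_cases h7 : ch = '}'
  · subst h7
    have m1 : pvStackMap.get? '}' = none := rfl
    have m2 : pvCloseToOpen.get? '}' = some '{' := rfl
    have m3 : ¬ ('}' ∈ pvOpeners) := by decide
    have m4 : ('}' ∈ pvClosers) := by decide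
    have m5 : pvOpeners[List.idxOf '}' pvClosers]?.getD ' ' = '{' := rfl
    cases hl : (PySem.Dict.getD st ['{', '}'] []).getLast? <;>
      simp [pvAStep, pvBEmit, m1, m2, m3, m4, m5, hl]
  by_cases h8 : ch = '>'
  · subst h8
    have m1 : pvStackMap.get? '>' = none := rfl
    have m2 : pvCloseToOpen.get? '>' = some '<' := rfl
    have m3 : ¬ ('>' ∈ pvOpeners) := by decide
    have m4 : ('>' ∈ pvClosers) := by decide
    have m5 : pvOpeners[List.idxOf '>' pvClosers]?.getD ' ' = '<' := rfl
    cases hl : (PySem.Dict.getD st ['<', '>'] []).getLast? <;>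
      simp [pvAStep, pvBEmit, m1, m2, m3, m4, m5, hl]
  by_cases h9 : ch = '.'
  · subst h9; rfl
  have hmapA : pvStackMap.get? ch = none := by
    rw [show pvStackMap = PySem.Dict.mk [('(', ')'), ('[', ']'), ('{', '}'), ('<', '>')] from rfl]
    simp [PySem.Dict.get?_mk_cons, Ne.symm h1, Ne.symm h2, Ne.symm h3, Ne.symm h4]
    rfl
  have hmapC : pvCloseToOpen.get? ch = none := by
    rw [show pvCloseToOpen = PySem.Dict.mk [(')', '('), (']', '['), ('}', '{'), ('>', '<')] from rfl]
    simp [PySem.Dict.get?_mk_cons, Ne.symm h5, Ne.symm h6, Ne.symm h7, Ne.symm h8]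
    rfl
  have n1 : ¬ (ch ∈ pvOpeners) := by simp [pvOpeners, h1, h2, h3, h4]
  have n2 : ¬ (ch ∈ pvClosers) := by simp [pvClosers, h5, h6, h7, h8]
  by_cases ha : PySem.Chars.isalpha ch
  · cases hl : (PySem.Dict.getD st [ch] []).getLast? <;>
      simp [pvAStep, pvBEmit, hl, hmapA, hmapC, ha, n1, n2, h9]
  · simp [pvAStep, pvBEmit, hmapA, hmapC, ha, n1, n2, h9]

-- B's pair accumulator appends
theorem pv_bacc (l : List (Int × Char)) (st : PySem.Dict (List Char) (List Int))
    (ps : List (Int × Int × List Char)) :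
    l.foldl pvBStep (st, ps) =
      ((l.foldl pvBStep (st, [])).1, ps ++ (l.foldl pvBStep (st, [])).2) := by
  induction l generalizing st ps with
  | nil => simp
  | cons x t ih =>
      simp only [List.foldl_cons]
      rw [show pvBStep (st, ps) x = ((pvBEmit st x).1, ps ++ (pvBEmit st x).2) from rfl,
          show pvBStep (st, []) x = ((pvBEmit st x).1, [] ++ (pvBEmit st x).2) from rfl]
      rw [ih _ (ps ++ (pvBEmit st x).2), ih _ ([] ++ (pvBEmit st x).2)]
      simp

-- fold fusion: A's loop = B's pass 1 followed by A's emission fold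
theorem pv_fuse (l : List (Int × Char)) (st : PySem.Dict (List Char) (List Int))
    (g : PySem.Dict Int (List (Int × Int)) × PySem.Dict (List Char) Int × Int) :
    l.foldl pvAStep (st, g) =
      ((l.foldl pvBStep (st, [])).1, (l.foldl pvBStep (st, [])).2.foldl pvGStep g) := by
  induction l generalizing st g with
  | nil => simp
  | cons x t ih =>
      simp only [List.foldl_cons]
      rw [pv_stepAB, ih]
      rw [show pvBStep (st, []) x = ((pvBEmit st x).1, [] ++ (pvBEmit st x).2) from rfl]
      rw [pv_bacc t (pvBEmit st x).1 ([] ++ (pvBEmit st x).2)]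
      simp [List.foldl_append]

-- generic facts about the incremental layer-assignment fold
def pvAssignStep (s : PySem.Dict (List Char) Int × Int) (k : List Char) :
    PySem.Dict (List Char) Int × Int := (s.1.insert k s.2, s.2 + 1)

theorem pv_afold_snd (l : List (List Char)) (d : PySem.Dict (List Char) Int) (n : Int) :
    (l.foldl pvAssignStep (d, n)).2 = n + l.length := by
  induction l generalizing d n with
  | nil => simp
  | cons k t ih => simp [pvAssignStep, ih]; omega

theorem pv_afold_contains (l : List (List Char)) (d : PySem.Dict (List Char) Int) (n : Int)
    (k : List Char) :
    (l.foldl pvAssignStep (d, n)).1.contains k = (d.contains k || l.contains k) := by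
  induction l generalizing d n with
  | nil => simp
  | cons k0 t ih =>
      simp only [List.foldl_cons, pvAssignStep, ih, PySem.Dict.contains_insert]
      by_cases h : k = k0
      · simp [h]
      · rw [beq_eq_false_iff_ne.mpr h]; simp [h]

theorem pv_afold_getD_not_mem (l : List (List Char)) (d : PySem.Dict (List Char) Int) (n : Int)
    (k : List Char) (h : k ∉ l) :
    (l.foldl pvAssignStep (d, n)).1.getD k 0 = d.getD k 0 := by
  induction l generalizing d n with
  | nil => rfl
  | cons k0 t ih =>
      simp only [List.mem_cons, not_or] at h
      simp only [List.foldl_cons, pvAssignStep]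
      rw [ih _ _ h.2]
      exact PySem.Dict.getD_insert_of_ne _ _ _ h.1

theorem pv_afold_getD_mem (l : List (List Char)) (d : PySem.Dict (List Char) Int) (n : Int)
    (k : List Char) (hnd : l.Nodup) (h : k ∈ l) :
    (l.foldl pvAssignStep (d, n)).1.getD k 0 = n + (List.idxOf k l : Int) := by
  induction l generalizing d n with
  | nil => simp at h
  | cons k0 t ih =>
      simp only [List.foldl_cons, pvAssignStep]
      rcases List.mem_cons.mp h with h0 | hm
      · subst h0
        rw [pv_afold_getD_not_mem _ _ _ _ (by simp at hnd; exact hnd.1)]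
        rw [PySem.Dict.getD_insert_self]
        simp
      · have hne : k ≠ k0 := by rintro rfl; simp at hnd; exact hnd.1 hm
        rw [ih _ _ (List.nodup_cons.mp hnd).2 hm]
        rw [List.idxOf_cons_ne _ (fun e => hne e.symm)]
        push_cast
        omega

theorem pv_LO_append (ps : List (Int × Int × List Char)) (p : Int × Int × List Char) :
    pvLO (ps ++ [p]) =
      if pvFixedB.contains (pvKeyOf p) || (pvLO ps).contains (pvKeyOf p) then pvLO ps
      else pvLO ps ++ [pvKeyOf p] := by
  simp only [pvLO, List.foldl_append, List.foldl_cons, List.foldl_nil]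

theorem pv_LO_not_fixed (ps : List (Int × Int × List Char)) (k : List Char)
    (h : k ∈ pvLO ps) : pvFixedB.contains k = false := by
  induction ps using List.reverseRecOn with
  | nil => simp [pvLO] at h
  | append_singleton ps p ih =>
      rw [pv_LO_append] at h
      split at h
      · exact ih h
      · next hc =>
        rcases List.mem_append.mp h with hm | hm
        · exact ih hm
        · simp only [List.mem_singleton] at hm
          subst hm
          simp only [Bool.or_eq_true, not_or] at hc
          exact Bool.not_eq_true _ |>.mp hc.1

theorem pv_LO_nodup (ps : List (Int × Int × List Char)) : (pvLO ps).Nodup := by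
  induction ps using List.reverseRecOn with
  | nil => simp [pvLO]
  | append_singleton ps p ih =>
      rw [pv_LO_append]
      split
      · exact ih
      · next hc =>
        simp only [Bool.or_eq_true, not_or, List.contains_eq_mem, decide_eq_true_eq] at hc
        exact List.Nodup.append ih (List.nodup_singleton _) (by simpa using hc.2)

theorem pv_LO_mono (ps : List (Int × Int × List Char)) (p : Int × Int × List Char)
    (k : List Char) (h : k ∈ pvLO ps) : k ∈ pvLO (ps ++ [p]) := by
  rw [pv_LO_append]
  split
  · exact h
  · exact List.mem_append_left _ h

theorem pv_cover (ps : List (Int × Int × List Char)) (p : Int × Int × List Char)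
    (h : p ∈ ps) : pvFixedB.contains (pvKeyOf p) = true ∨ pvKeyOf p ∈ pvLO ps := by
  induction ps using List.reverseRecOn with
  | nil => simp at h
  | append_singleton ps q ih =>
      rcases List.mem_append.mp h with hm | hm
      · rcases ih hm with hf | hl
        · exact Or.inl hf
        · exact Or.inr (pv_LO_mono _ _ _ hl)
      · simp only [List.mem_singleton] at hm
        subst hm
        rw [pv_LO_append]
        by_cases hf : pvFixedB.contains (pvKeyOf p) = true
        · exact Or.inl hf
        · right
          by_cases hc : pvKeyOf p ∈ pvLO ps
          · split
            · exact hc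
            · exact List.mem_append_left _ hc
          · rw [if_neg (by simp [Bool.not_eq_true _ ▸ hf, hc, List.contains_eq_mem])]
            exact List.mem_append_right _ (List.mem_singleton.mpr rfl)

theorem pv_idx_stable (ps : List (Int × Int × List Char)) (p : Int × Int × List Char)
    (k : List Char) (h : k ∈ pvLO ps) :
    List.idxOf k (pvLO (ps ++ [p])) = List.idxOf k (pvLO ps) := by
  rw [pv_LO_append]
  split
  · rfl
  · rw [List.idxOf_append, if_pos h]

theorem pv_layerF_stable (ps : List (Int × Int × List Char)) (p : Int × Int × List Char)
    (k : List Char) (h : pvFixedB.contains k = true ∨ k ∈ pvLO ps) :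
    pvLayerF (pvLO (ps ++ [p])) k = pvLayerF (pvLO ps) k := by
  unfold pvLayerF
  cases hf : pvFixedB.get? k with
  | some v => rfl
  | none =>
      rcases h with hc | hm
      · rw [PySem.Dict.contains_eq_isSome_get?, hf] at hc; simp at hc
      · rw [pv_idx_stable _ _ _ hm]

theorem pv_fixed_get?_none (k : List Char) (h : pvFixedB.contains k = false) :
    pvFixedB.get? k = none := by
  rw [PySem.Dict.contains_eq_isSome_get?] at h
  cases hg : pvFixedB.get? k with
  | none => rfl
  | some v => rw [hg] at h; simp at h

theorem pv_group_append (f : List Char → Int) (ps : List (Int × Int × List Char))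
    (o c : Int) (kk : List Char) :
    pvGroup f (ps ++ [(o, c, kk)]) =
      (pvGroup f ps).insert (f kk) ((pvGroup f ps).getD (f kk) [] ++ [(o, c)]) := by
  unfold pvGroup
  rw [List.foldl_append]
  rfl

theorem pv_group_congr (ps : List (Int × Int × List Char)) (f f' : List Char → Int)
    (h : ∀ p ∈ ps, f' (pvKeyOf p) = f (pvKeyOf p)) : pvGroup f' ps = pvGroup f ps := by
  unfold pvGroup
  apply PySem.List.foldl_congr_mem
  intro acc p hp
  rw [h p hp]

theorem pv_group_inv (ps : List (Int × Int × List Char)) :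
    ps.foldl pvGStep (PySem.Dict.empty, pvFixedA, 4) =
      (pvGroup (pvLayerF (pvLO ps)) ps,
       ((pvLO ps).foldl pvAssignStep (pvFixedA, (4 : Int))).1,
       4 + ((pvLO ps).length : Int)) := by
  induction ps using List.reverseRecOn with
  | nil => norm_num [pvGroup, pvLO]
  | append_singleton ps p ih =>
      obtain ⟨o, c, kk⟩ := p
      rw [List.foldl_append, List.foldl_cons, List.foldl_nil, ih]
      have hcont : ((pvLO ps).foldl pvAssignStep (pvFixedA, (4 : Int))).1.contains kk
          = (pvFixedB.contains kk || (pvLO ps).contains kk) := pv_afold_contains _ _ _ _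
      have hsnd : ((pvLO ps).foldl pvAssignStep (pvFixedA, (4 : Int))).2
          = 4 + ((pvLO ps).length : Int) := pv_afold_snd _ _ _
      by_cases hT : (pvFixedB.contains kk || (pvLO ps).contains kk) = true
      · -- key already has a layer
        have hLO : pvLO (ps ++ [(o, c, kk)]) = pvLO ps := by
          rw [pv_LO_append]
          simp only [pvKeyOf]
          rw [if_pos hT]
        have hlayer : ((pvLO ps).foldl pvAssignStep (pvFixedA, (4 : Int))).1.getD kk 0
            = pvLayerF (pvLO ps) kk := by
          by_cases hm : kk ∈ pvLO ps
          · rw [pv_afold_getD_mem _ _ _ _ (pv_LO_nodup ps) hm]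
            unfold pvLayerF
            rw [pv_fixed_get?_none kk (pv_LO_not_fixed ps kk hm)]
          · have hf : pvFixedB.contains kk = true := by
              rcases (by simpa using hT :
                  pvFixedB.contains kk = true ∨ kk ∈ pvLO ps) with h | h
              · exact h
              · exact absurd (by simpa using h) hm
            rw [pv_afold_getD_not_mem _ _ _ _ hm]
            unfold pvLayerF
            rw [PySem.Dict.contains_eq_isSome_get?] at hf
            cases hg : pvFixedB.get? kk with
            | none => rw [hg] at hf; simp at hf
            | some v =>
                rw [show pvFixedA = pvFixedB from rfl, PySem.Dict.getD_eq_get?_getD, hg]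
                rfl
        rw [hLO, pv_group_append]
        show pvGStep _ (o, c, kk) = _
        unfold pvGStep
        simp only [hcont, hT, if_true, hlayer]
      · -- new letter key
        have hTf : (pvFixedB.contains kk || (pvLO ps).contains kk) = false := by
          simpa using hT
        have hnf : pvFixedB.contains kk = false := by
          rcases (by simpa using hTf :
              pvFixedB.contains kk = false ∧ kk ∉ pvLO ps) with ⟨h1, _⟩
          exact h1
        have hnm : kk ∉ pvLO ps := by
          rcases (by simpa using hTf :
              pvFixedB.contains kk = false ∧ kk ∉ pvLO ps) with ⟨_, h2⟩
          exact h2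
        have hLO : pvLO (ps ++ [(o, c, kk)]) = pvLO ps ++ [kk] := by
          rw [pv_LO_append]
          simp only [pvKeyOf]
          rw [if_neg (by rw [hTf]; simp)]
        have hlayer' : pvLayerF (pvLO ps ++ [kk]) kk = 4 + ((pvLO ps).length : Int) := by
          unfold pvLayerF
          rw [pv_fixed_get?_none kk hnf, List.idxOf_append, if_neg hnm, List.idxOf_cons_self]
          push_cast; ring
        have hstable : ∀ q ∈ ps, pvLayerF (pvLO (ps ++ [(o, c, kk)])) (pvKeyOf q)
            = pvLayerF (pvLO ps) (pvKeyOf q) := by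
          intro q hq
          exact pv_layerF_stable ps (o, c, kk) (pvKeyOf q)
            (by rcases pv_cover ps q hq with h | h; exacts [Or.inl h, Or.inr h])
        rw [pv_group_append]
        show pvGStep _ (o, c, kk) = _
        unfold pvGStep
        simp only [hcont, hTf, Bool.false_eq_true, if_false]
        rw [hLO] at hstable ⊢
        rw [pv_group_congr ps _ _ hstable]
        rw [List.foldl_append, List.foldl_cons, List.foldl_nil]
        show _ = (_, ((_ : PySem.Dict (List Char) Int × Int).1.insert kk _, _))
        rw [hsnd, hlayer', PySem.Dict.getD_insert_self]
        simp only [List.length_append, List.length_cons, List.length_nil]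
        push_cast
        rw [add_assoc]

-- the incremental layer assignment equals the closed-form one
theorem pv_group (ps : List (Int × Int × List Char)) :
    (ps.foldl pvGStep (PySem.Dict.empty, pvFixedA, 4)).1 = pvGroup (pvLayerF (pvLO ps)) ps := by
  rw [pv_group_inv]

-- ===== VERDICT (by name: the statement is the Claim_ definition above) =====
theorem parse_dotbracket_pseudoknots_spec : Claim_equal_parse_dotbracket_pseudoknots := by
  intro db _
  show _ = _
  unfold parse_dotbracket_pseudoknots parse_dotbracket_pseudoknots_alt
  rw [pv_fuse]
  exact congrArg _ (pv_group _)
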